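-- pv_equiv track=rewrite | github.com/mitchellnel/technical-interview-prep | gtci/islands/matrixCycle.py | matrix_cycle
-- ===== SOURCE A (Python) =====
-- def matrix_cycle(matrix):
--     height = len(matrix)
--     width = len(matrix[0])
--
--     visited = [[False for _ in range(width)] for _ in range(height)]
--
--     # traverse element-by-element
--     for row in range(height):
--         for col in range(width):
--             if not visited[row][col]:
--                 if find_cycle(matrix, visited, matrix[row][col], row, col, -1, -1):
--                     return True
--
--     return False
--
-- def find_cycle(matrix, visited, char, row, col, prev_row, prev_col):
--     height = len(matrix)
--     width = len(matrix[0])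
--
--     # base case - out of bounds, wrong character, or we've found a cell we already visited
--     if row < 0 or row >= height:
--         return False
--     if col < 0 or col >= width:
--         return False
--     if matrix[row][col] != char:
--         return False
--     if visited[row][col]:
--         return True
--
--     # mark as visited
--     visited[row][col] = True
--
--     # traverse neighbours -- but don't traverse parent
--     if row - 1 != prev_row and find_cycle(
--         matrix, visited, char, row - 1, col, row, col
--     ):
--         return True
--     if row + 1 != prev_row and find_cycle(
--         matrix, visited, char, row + 1, col, row, col
--     ):
--         return True
--     if col - 1 != prev_col and find_cycle(
--         matrix, visited, char, row, col - 1, row, col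
--     ):
--         return True
--     if col + 1 != prev_col and find_cycle(
--         matrix, visited, char, row, col + 1, row, col
--     ):
--         return True
--
--     return False
-- ===== SOURCE B (Python) =====
-- def matrix_cycle(matrix):
--     height = len(matrix)
--     width = len(matrix[0])
--
--     visited = [[False] * width for _ in range(height)]
--
--     for srow in range(height):
--         for scol in range(width):
--             if visited[srow][scol]:
--                 continue
--             char = matrix[srow][scol]
--             # explicit stack of frames; each frame is the list of pending
--             # (row, col, prev_row, prev_col) calls of one DFS level
--             stack = [[(srow, scol, -1, -1)]]
--             while stack:
--                 frame = stack[-1]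
--                 if not frame:
--                     stack.pop()
--                     continue
--                 row, col, prev_row, prev_col = frame.pop(0)
--                 if row < 0 or row >= height or col < 0 or col >= width:
--                     continue
--                 if matrix[row][col] != char:
--                     continue
--                 if visited[row][col]:
--                     return True
--                 visited[row][col] = True
--                 nbrs = []
--                 if row - 1 != prev_row:
--                     nbrs.append((row - 1, col, row, col))
--                 if row + 1 != prev_row:
--                     nbrs.append((row + 1, col, row, col))
--                 if col - 1 != prev_col:
--                     nbrs.append((row, col - 1, row, col))
--                 if col + 1 != prev_col:
--                     nbrs.append((row, col + 1, row, col))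
--                 stack.append(nbrs)
--
--     return False
-- ===== Notes on version B (the rewrite author's own statement) =====
-- stated objective: alternative
-- what changed: The recursive DFS (find_cycle helper plus Python call stack) is replaced by an iterative DFS that keeps an explicit stack of frames of pending (row, col, prev_row, prev_col) calls, removing the helper function and the recursion (and with it Python's recursion-depth limit on large same-character regions).
-- outside the precondition, e.g. on matrix_cycle([]): A raises IndexError, B raises IndexError; on matrix_cycle([['a', 'a'], ['a']]): A raises IndexError, B raises IndexError
import Mathlib
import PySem

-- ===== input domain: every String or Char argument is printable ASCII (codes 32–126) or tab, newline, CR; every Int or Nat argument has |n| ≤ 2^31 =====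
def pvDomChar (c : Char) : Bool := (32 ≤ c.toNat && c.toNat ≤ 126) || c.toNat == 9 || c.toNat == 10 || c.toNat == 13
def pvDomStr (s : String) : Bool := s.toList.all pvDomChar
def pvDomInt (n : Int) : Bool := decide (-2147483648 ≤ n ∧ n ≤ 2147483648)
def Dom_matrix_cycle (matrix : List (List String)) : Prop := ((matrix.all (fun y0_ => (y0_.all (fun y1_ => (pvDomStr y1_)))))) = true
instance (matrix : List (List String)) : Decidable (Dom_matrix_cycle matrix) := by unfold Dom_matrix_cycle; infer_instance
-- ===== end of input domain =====

-- B replaces A's recursive DFS with an explicit stack of frames (same visited matrix, same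
-- traversal order); equivalence of the return values is proved (neither version mutates its argument).

-- Shared helpers: visited-matrix lookup and marking, the count of unvisited cells
-- (pvMu, the termination measure of port B), and the shape of the visited matrix.
def pvShaped (h w : Nat) (v : List (List Bool)) : Prop :=
  v.length = h ∧ ∀ row ∈ v, row.length = w

def pvMu (v : List (List Bool)) : Nat := (v.map (fun row => row.count false)).sum

def pvLook (v : List (List Bool)) (r c : Int) : Bool := (v.getD r.toNat []).getD c.toNat false

def pvMark (v : List (List Bool)) (r c : Int) : List (List Bool) :=
  v.set r.toNat ((v.getD r.toNat []).set c.toNat true)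

-- the full set of start cells, row-major (the two nested for loops)
def pvCells (h w : Nat) : List (Int × Int) :=
  (PySem.List.pyRange 0 h 1).flatMap (fun r => (PySem.List.pyRange 0 w 1).map (fun c => (r, c)))

def pvInitV (h w : Nat) : List (List Bool) := List.replicate h (List.replicate w false)

-- ===== PORT A =====
-- find_cycle: literal transliteration of A's recursion.  The extra fuel parameter only
-- makes the recursion structural; matrix_cycle always passes fuel > pvMu visited (the
-- recursion depth is bounded by the number of unvisited cells), so fuel 0 is unreachable.
def pvFindCycleF (m : List (List String)) (ch : String) :
    Nat → Int → Int → Int → Int → List (List Bool) → Bool × List (List Bool)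
  | 0, _, _, _, _, v => (false, v)
  | fuel + 1, r, c, pr, pc, v =>
    if r < 0 ∨ (m.length : Int) ≤ r then (false, v)
    else if c < 0 ∨ ((m.headD []).length : Int) ≤ c then (false, v)
    else if ¬((m.getD r.toNat []).getD c.toNat "" = ch) then (false, v)
    else if pvLook v r c = true then (true, v)
    else
      let v1 := pvMark v r c
      let s1 := if r - 1 = pr then (false, v1) else pvFindCycleF m ch fuel (r - 1) c r c v1
      if s1.1 then s1
      else
        let s2 := if r + 1 = pr then (false, s1.2)
                  else pvFindCycleF m ch fuel (r + 1) c r c s1.2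
        if s2.1 then s2
        else
          let s3 := if c - 1 = pc then (false, s2.2)
                    else pvFindCycleF m ch fuel r (c - 1) r c s2.2
          if s3.1 then s3
          else
            if c + 1 = pc then (false, s3.2)
            else pvFindCycleF m ch fuel r (c + 1) r c s3.2

-- the outer row-major loop of A (early return on True)
def pvOuterA (m : List (List String)) (cells : List (Int × Int)) (v : List (List Bool)) : Bool :=
  match cells with
  | [] => false
  | (r, c) :: rest =>
    if pvLook v r c = true then pvOuterA m rest v
    else
      let s := pvFindCycleF m ((m.getD r.toNat []).getD c.toNat "")
        (m.length * (m.headD []).length + 1) r c (-1) (-1) v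
      if s.1 then true else pvOuterA m rest s.2

def matrix_cycle (matrix : List (List String)) : Bool :=
  pvOuterA matrix (pvCells matrix.length (matrix.headD []).length)
    (pvInitV matrix.length (matrix.headD []).length)

-- ===== PORT B =====
-- Lemmas the machine's well-founded recursion cites (measure pvMu of the visited matrix).
theorem pv_count_false_set (row : List Bool) (j : Nat) (hj : j < row.length)
    (hv : row.getD j false = false) : (row.set j true).count false < row.count false := by
  induction row generalizing j with
  | nil => simp at hj
  | cons b bs ih =>
    cases j with
    | zero =>
      simp [List.getD] at hv
      subst hv
      simp
    | succ j =>
      simp at hj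
      have h2 := ih j hj (by simpa [List.getD] using hv)
      simp [List.count_cons]
      omega

theorem pv_mu_set_lt (v : List (List Bool)) (i : Nat) (row' : List Bool)
    (hi : i < v.length) (hlt : row'.count false < (v.getD i []).count false) :
    pvMu (v.set i row') < pvMu v := by
  induction v generalizing i with
  | nil => simp at hi
  | cons a as ih =>
    cases i with
    | zero => simp [pvMu, List.getD] at hlt ⊢; omega
    | succ i =>
      simp at hi
      have h2 := ih i hi (by simpa [List.getD] using hlt)
      simp [pvMu] at h2 ⊢
      omega

theorem pvMu_mark_lt (v : List (List Bool)) (r c : Int)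
    (hi : r.toNat < v.length) (hj : c.toNat < (v.getD r.toNat []).length)
    (hl : pvLook v r c = false) : pvMu (pvMark v r c) < pvMu v :=
  pv_mu_set_lt v r.toNat _ hi (pv_count_false_set _ _ hj hl)

theorem pvShaped_mark (h w : Nat) (v : List (List Bool)) (hs : pvShaped h w v) (r c : Int)
    (hi : r.toNat < v.length) : pvShaped h w (pvMark v r c) := by
  obtain ⟨hlen, hrows⟩ := hs
  refine ⟨by simpa [pvMark] using hlen, ?_⟩
  intro row hrow
  rcases List.mem_or_eq_of_mem_set hrow with hmem | heq
  · exact hrows row hmem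
  · subst heq
    have hmem : v.getD r.toNat [] ∈ v := by
      rw [List.getD_eq_getElem v [] hi]; exact List.getElem_mem hi
    simpa using hrows _ hmem

theorem pv_hi (h w : Nat) (v : List (List Bool)) (hs : pvShaped h w v) (r : Int)
    (hr : ¬(r < 0 ∨ (h : Int) ≤ r)) : r.toNat < v.length := by
  have := hs.1; omega

theorem pv_hj (h w : Nat) (v : List (List Bool)) (hs : pvShaped h w v) (r c : Int)
    (hc : ¬(c < 0 ∨ (w : Int) ≤ c)) (hi : r.toNat < v.length) :
    c.toNat < (v.getD r.toNat []).length := by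
  have hmem : v.getD r.toNat [] ∈ v := by
    rw [List.getD_eq_getElem _ _ hi]; exact List.getElem_mem hi
  have := hs.2 _ hmem; omega

-- the visited matrix bundled with its shape (termination of the machine needs it)
def pvVS (m : List (List String)) : Type :=
  {v : List (List Bool) // pvShaped m.length (m.headD []).length v}

-- the filtered neighbour list pushed as a new frame (Source B's nbrs)
def pvNbrs (r c pr pc : Int) : List (Int × Int × Int × Int) :=
  (if r - 1 ≠ pr then [(r - 1, c, r, c)] else []) ++
  (if r + 1 ≠ pr then [(r + 1, c, r, c)] else []) ++
  (if c - 1 ≠ pc then [(r, c - 1, r, c)] else []) ++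
  (if c + 1 ≠ pc then [(r, c + 1, r, c)] else [])

-- the while loop over the explicit stack of frames (Source B's inner loop)
def pvRun (m : List (List String)) (ch : String) (v : pvVS m)
    (stack : List (List (Int × Int × Int × Int))) : Bool × pvVS m :=
  match stack with
  | [] => (false, v)
  | [] :: fs => pvRun m ch v fs
  | ((r, c, pr, pc) :: rest) :: fs =>
    if h1 : r < 0 ∨ (m.length : Int) ≤ r then pvRun m ch v (rest :: fs)
    else if h2 : c < 0 ∨ ((m.headD []).length : Int) ≤ c then pvRun m ch v (rest :: fs)
    else if h3 : ¬((m.getD r.toNat []).getD c.toNat "" = ch) then pvRun m ch v (rest :: fs)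
    else if h4 : pvLook v.1 r c = true then (true, v)
    else
      have hi : r.toNat < v.1.length := pv_hi _ _ v.1 v.2 r h1
      have hj : c.toNat < (v.1.getD r.toNat []).length := pv_hj _ _ v.1 v.2 r c h2 hi
      have hlt : pvMu (pvMark v.1 r c) < pvMu v.1 :=
        pvMu_mark_lt v.1 r c hi hj (by simpa using h4)
      let v1 : pvVS m := ⟨pvMark v.1 r c, pvShaped_mark _ _ v.1 v.2 r c hi⟩
      pvRun m ch v1 (pvNbrs r c pr pc :: rest :: fs)
termination_by (pvMu v.1, (stack.map List.length).sum, stack.length)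

def pvOuterB (m : List (List String)) (cells : List (Int × Int)) (v : pvVS m) : Bool :=
  match cells with
  | [] => false
  | (r, c) :: rest =>
    if pvLook v.1 r c = true then pvOuterB m rest v
    else
      let s := pvRun m ((m.getD r.toNat []).getD c.toNat "") v [[(r, c, -1, -1)]]
      if s.1 then true else pvOuterB m rest s.2

theorem pvShaped_init (h w : Nat) : pvShaped h w (pvInitV h w) := by
  constructor
  · simp [pvInitV]
  · intro row hrow
    simp_all [pvInitV, List.eq_of_mem_replicate hrow]

def matrix_cycle_alt (matrix : List (List String)) : Bool :=
  pvOuterB matrix (pvCells matrix.length (matrix.headD []).length)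
    ⟨pvInitV matrix.length (matrix.headD []).length,
      pvShaped_init matrix.length (matrix.headD []).length⟩

-- ===== PRECONDITION & SPEC =====
-- Pre_ excludes exactly the inputs where Python A raises IndexError: the empty matrix
-- (len(matrix[0])) and matrices with a row shorter than row 0 (matrix[row][col]).
def Pre_matrix_cycle (matrix : List (List String)) : Prop :=
  matrix ≠ [] ∧ ∀ row ∈ matrix, (matrix.headD []).length ≤ row.length
instance (matrix : List (List String)) : Decidable (Pre_matrix_cycle matrix) := by
  unfold Pre_matrix_cycle; infer_instance

def pvWitness_matrix_cycle : List (List String) := [["a", "b"], ["b", "a"]]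

def Spec_matrix_cycle (matrix : List (List String)) (out : Bool) : Prop := out = matrix_cycle_alt matrix
instance (matrix : List (List String)) (out : Bool) : Decidable (Spec_matrix_cycle matrix out) := by unfold Spec_matrix_cycle; infer_instance

-- ===== CLAIM (what is proved, stated in full; the proofs are below) =====
def Claim_equal_matrix_cycle : Prop := ∀ (matrix : List (List String)), Dom_matrix_cycle matrix → Pre_matrix_cycle matrix → Spec_matrix_cycle matrix (matrix_cycle matrix)

-- ===== LEMMAS AND PROOFS =====

-- Sequential execution of a list of pending calls at a fixed fuel (A-side spec form).
def pvSeqF (m : List (List String)) (ch : String) (fuel : Nat) :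
    List (Int × Int × Int × Int) → List (List Bool) → Bool × List (List Bool)
  | [], v => (false, v)
  | (r, c, pr, pc) :: cs, v =>
    let s := pvFindCycleF m ch fuel r c pr pc v
    if s.1 then s else pvSeqF m ch fuel cs s.2

theorem pvSeqF_one (m : List (List String)) (ch : String) (fuel : Nat) (r c pr pc : Int)
    (v : List (List Bool)) :
    pvSeqF m ch fuel [(r, c, pr, pc)] v = pvFindCycleF m ch fuel r c pr pc v := by
  cases hs : (pvFindCycleF m ch fuel r c pr pc v).1 <;>
    simp only [pvSeqF, hs, if_true, if_false, Bool.false_eq_true]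
  exact (Prod.ext hs.symm rfl)

theorem pvSeqF_append (m : List (List String)) (ch : String) (fuel : Nat)
    (a b : List (Int × Int × Int × Int)) (v : List (List Bool)) :
    pvSeqF m ch fuel (a ++ b) v =
      (let s := pvSeqF m ch fuel a v; if s.1 then s else pvSeqF m ch fuel b s.2) := by
  induction a generalizing v with
  | nil => simp [pvSeqF]
  | cons x xs ih =>
    obtain ⟨r, c, pr, pc⟩ := x
    cases hs : (pvFindCycleF m ch fuel r c pr pc v).1 <;>
      simp only [List.cons_append, pvSeqF, hs, if_true, if_false, Bool.false_eq_true] <;>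
      simp [ih]

-- one productive unfolding of find_cycle: mark the cell, then run the filtered
-- neighbour calls sequentially at one fuel less
theorem pvF_succ_prod (m : List (List String)) (ch : String) (fuel : Nat) (r c pr pc : Int)
    (v : List (List Bool))
    (h1 : ¬(r < 0 ∨ (m.length : Int) ≤ r))
    (h2 : ¬(c < 0 ∨ ((m.headD []).length : Int) ≤ c))
    (h3 : (m.getD r.toNat []).getD c.toNat "" = ch)
    (h4 : ¬(pvLook v r c = true)) :
    pvFindCycleF m ch (fuel + 1) r c pr pc v =
      pvSeqF m ch fuel (pvNbrs r c pr pc) (pvMark v r c) := by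
  rw [pvFindCycleF, if_neg h1, if_neg h2, if_neg (not_not_intro h3), if_neg h4]
  simp only [pvNbrs]
  rw [pvSeqF_append, pvSeqF_append, pvSeqF_append]
  by_cases hA : r - 1 = pr <;>
    by_cases hB : r + 1 = pr <;>
      by_cases hC : c - 1 = pc <;>
        by_cases hD : c + 1 = pc <;>
          simp only [hA, hB, hC, hD, if_true, if_false, ite_not, pvSeqF_one, pvSeqF] <;>
          (try simp) <;> (try (intros; split_ifs <;> simp_all))

-- quick-exit unfoldings at explicit successor fuel
theorem pvF_succ_quick1 (m : List (List String)) (ch : String) (fuel : Nat) (r c pr pc : Int)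
    (v : List (List Bool)) (h1 : r < 0 ∨ (m.length : Int) ≤ r) :
    pvFindCycleF m ch (fuel + 1) r c pr pc v = (false, v) := by
  rw [pvFindCycleF, if_pos h1]

theorem pvF_succ_quick2 (m : List (List String)) (ch : String) (fuel : Nat) (r c pr pc : Int)
    (v : List (List Bool)) (h1 : ¬(r < 0 ∨ (m.length : Int) ≤ r))
    (h2 : c < 0 ∨ ((m.headD []).length : Int) ≤ c) :
    pvFindCycleF m ch (fuel + 1) r c pr pc v = (false, v) := by
  rw [pvFindCycleF, if_neg h1, if_pos h2]

theorem pvF_succ_quick3 (m : List (List String)) (ch : String) (fuel : Nat) (r c pr pc : Int)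
    (v : List (List Bool)) (h1 : ¬(r < 0 ∨ (m.length : Int) ≤ r))
    (h2 : ¬(c < 0 ∨ ((m.headD []).length : Int) ≤ c))
    (h3 : ¬((m.getD r.toNat []).getD c.toNat "" = ch)) :
    pvFindCycleF m ch (fuel + 1) r c pr pc v = (false, v) := by
  rw [pvFindCycleF, if_neg h1, if_neg h2, if_pos h3]

theorem pvF_succ_hit (m : List (List String)) (ch : String) (fuel : Nat) (r c pr pc : Int)
    (v : List (List Bool)) (h1 : ¬(r < 0 ∨ (m.length : Int) ≤ r))
    (h2 : ¬(c < 0 ∨ ((m.headD []).length : Int) ≤ c))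
    (h3 : (m.getD r.toNat []).getD c.toNat "" = ch)
    (h4 : pvLook v r c = true) :
    pvFindCycleF m ch (fuel + 1) r c pr pc v = (true, v) := by
  rw [pvFindCycleF, if_neg h1, if_neg h2, if_neg (not_not_intro h3), if_pos h4]

-- shape preservation and monotonicity of the unvisited count
theorem pvF_mono (m : List (List String)) (ch : String) :
    ∀ (fuel : Nat) (r c pr pc : Int) (v : List (List Bool)),
      pvShaped m.length (m.headD []).length v →
      pvShaped m.length (m.headD []).length (pvFindCycleF m ch fuel r c pr pc v).2 ∧
        pvMu (pvFindCycleF m ch fuel r c pr pc v).2 ≤ pvMu v := by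
  intro fuel
  induction fuel with
  | zero => intro r c pr pc v hs; exact ⟨hs, le_refl _⟩
  | succ fuel ih =>
    have seq : ∀ (cs : List (Int × Int × Int × Int)) (v : List (List Bool)),
        pvShaped m.length (m.headD []).length v →
        pvShaped m.length (m.headD []).length (pvSeqF m ch fuel cs v).2 ∧
          pvMu (pvSeqF m ch fuel cs v).2 ≤ pvMu v := by
      intro cs
      induction cs with
      | nil => intro v hs; exact ⟨hs, le_refl _⟩
      | cons x xs ihx =>
        intro v hs
        obtain ⟨r, c, pr, pc⟩ := x
        have hx := ih r c pr pc v hs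
        cases hb : (pvFindCycleF m ch fuel r c pr pc v).1 <;>
          simp only [pvSeqF, hb, if_true, if_false, Bool.false_eq_true]
        · have := ihx _ hx.1
          exact ⟨this.1, le_trans this.2 hx.2⟩
        · exact hx
    intro r c pr pc v hs
    by_cases h1 : r < 0 ∨ (m.length : Int) ≤ r
    · rw [pvFindCycleF, if_pos h1]; exact ⟨hs, le_refl _⟩
    by_cases h2 : c < 0 ∨ ((m.headD []).length : Int) ≤ c
    · rw [pvFindCycleF, if_neg h1, if_pos h2]; exact ⟨hs, le_refl _⟩
    by_cases h3 : (m.getD r.toNat []).getD c.toNat "" = ch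
    case neg => rw [pvFindCycleF, if_neg h1, if_neg h2, if_pos h3]; exact ⟨hs, le_refl _⟩
    by_cases h4 : pvLook v r c = true
    · rw [pvFindCycleF, if_neg h1, if_neg h2, if_neg (not_not_intro h3), if_pos h4]
      exact ⟨hs, le_refl _⟩
    rw [pvF_succ_prod m ch fuel r c pr pc v h1 h2 h3 h4]
    have hi := pv_hi _ _ v hs r h1
    have hj := pv_hj _ _ v hs r c h2 hi
    have hmark := pvMu_mark_lt v r c hi hj (by simpa using h4)
    have hsm := pvShaped_mark _ _ v hs r c hi
    have := seq (pvNbrs r c pr pc) _ hsm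
    exact ⟨this.1, le_trans this.2 (le_of_lt hmark)⟩

-- the result does not depend on the fuel once it exceeds the number of unvisited cells
theorem pvF_irrel (m : List (List String)) (ch : String) :
    ∀ (fuel fuel' : Nat) (r c pr pc : Int) (v : List (List Bool)),
      pvShaped m.length (m.headD []).length v → pvMu v < fuel → pvMu v < fuel' →
      pvFindCycleF m ch fuel r c pr pc v = pvFindCycleF m ch fuel' r c pr pc v := by
  intro fuel
  induction fuel with
  | zero => intro fuel' r c pr pc v _ hf _; omega
  | succ fuel ih =>
    have seq : ∀ (b : Nat) (cs : List (Int × Int × Int × Int)) (v : List (List Bool)),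
        pvShaped m.length (m.headD []).length v → pvMu v < fuel → pvMu v < b →
        pvSeqF m ch fuel cs v = pvSeqF m ch b cs v := by
      intro b cs
      induction cs with
      | nil => intro v _ _ _; rfl
      | cons x xs ihx =>
        intro v hs hf hb
        obtain ⟨r, c, pr, pc⟩ := x
        have hx : pvFindCycleF m ch fuel r c pr pc v = pvFindCycleF m ch b r c pr pc v :=
          ih b r c pr pc v hs hf hb
        have hm := pvF_mono m ch fuel r c pr pc v hs
        cases hv : (pvFindCycleF m ch fuel r c pr pc v).1 <;>
          simp only [pvSeqF, ← hx, hv, if_true, if_false, Bool.false_eq_true]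
        exact ihx _ hm.1 (lt_of_le_of_lt hm.2 hf) (lt_of_le_of_lt hm.2 hb)
    intro fuel' r c pr pc v hs hf hb
    cases fuel' with
    | zero => omega
    | succ b =>
      by_cases h1 : r < 0 ∨ (m.length : Int) ≤ r
      · rw [pvFindCycleF, if_pos h1, pvFindCycleF, if_pos h1]
      by_cases h2 : c < 0 ∨ ((m.headD []).length : Int) ≤ c
      · rw [pvFindCycleF, if_neg h1, if_pos h2, pvFindCycleF, if_neg h1, if_pos h2]
      by_cases h3 : (m.getD r.toNat []).getD c.toNat "" = ch
      case neg =>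
        rw [pvFindCycleF, if_neg h1, if_neg h2, if_pos h3,
          pvFindCycleF, if_neg h1, if_neg h2, if_pos h3]
      by_cases h4 : pvLook v r c = true
      · rw [pvFindCycleF, if_neg h1, if_neg h2, if_neg (not_not_intro h3), if_pos h4,
          pvFindCycleF, if_neg h1, if_neg h2, if_neg (not_not_intro h3), if_pos h4]
      rw [pvF_succ_prod m ch fuel r c pr pc v h1 h2 h3 h4,
        pvF_succ_prod m ch b r c pr pc v h1 h2 h3 h4]
      have hi := pv_hi _ _ v hs r h1
      have hj := pv_hj _ _ v hs r c h2 hi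
      have hmark := pvMu_mark_lt v r c hi hj (by simpa using h4)
      exact seq b (pvNbrs r c pr pc) _ (pvShaped_mark _ _ v hs r c hi) (by omega) (by omega)

-- find_cycle started on a shape-invariant state, with just enough fuel, at subtype level
def pvFCV (m : List (List String)) (ch : String) (r c pr pc : Int) (v : pvVS m) :
    Bool × pvVS m :=
  ((pvFindCycleF m ch (pvMu v.1 + 1) r c pr pc v.1).1,
    ⟨(pvFindCycleF m ch (pvMu v.1 + 1) r c pr pc v.1).2,
      (pvF_mono m ch (pvMu v.1 + 1) r c pr pc v.1 v.2).1⟩)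

theorem pvF_at (m : List (List String)) (ch : String) (fuel : Nat) (r c pr pc : Int)
    (v : pvVS m) (hf : pvMu v.1 < fuel) :
    pvFindCycleF m ch fuel r c pr pc v.1 =
      ((pvFCV m ch r c pr pc v).1, (pvFCV m ch r c pr pc v).2.1) := by
  rw [pvF_irrel m ch fuel (pvMu v.1 + 1) r c pr pc v.1 v.2 hf (by omega)]
  rfl

-- sequential execution at subtype level (the machine's spec form)
def pvSeqV (m : List (List String)) (ch : String) :
    pvVS m → List (Int × Int × Int × Int) → Bool × pvVS m
  | v, [] => (false, v)
  | v, (r, c, pr, pc) :: cs =>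
    let s := pvFCV m ch r c pr pc v
    if s.1 then s else pvSeqV m ch s.2 cs

def pvSeqStackV (m : List (List String)) (ch : String) :
    pvVS m → List (List (Int × Int × Int × Int)) → Bool × pvVS m
  | v, [] => (false, v)
  | v, f :: fs =>
    let s := pvSeqV m ch v f
    if s.1 then s else pvSeqStackV m ch s.2 fs

theorem pvSeqV_one (m : List (List String)) (ch : String) (v : pvVS m) (r c pr pc : Int) :
    pvSeqV m ch v [(r, c, pr, pc)] = pvFCV m ch r c pr pc v := by
  cases hs : (pvFCV m ch r c pr pc v).1 <;>
    simp only [pvSeqV, hs, if_true, if_false, Bool.false_eq_true]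
  exact (Prod.ext hs.symm rfl)

-- the bridge: plain-level sequential execution is the projection of the subtype-level one
theorem pvSeqF_bridge (m : List (List String)) (ch : String) (fuel : Nat)
    (cs : List (Int × Int × Int × Int)) :
    ∀ (v : pvVS m), pvMu v.1 < fuel →
      pvSeqF m ch fuel cs v.1 = ((pvSeqV m ch v cs).1, (pvSeqV m ch v cs).2.1) := by
  induction cs with
  | nil => intro v _; rfl
  | cons x xs ih =>
    intro v hf
    obtain ⟨r, c, pr, pc⟩ := x
    have hx := pvF_at m ch fuel r c pr pc v hf
    have hm := pvF_mono m ch fuel r c pr pc v.1 v.2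
    cases hb : (pvFCV m ch r c pr pc v).1 <;>
      simp only [pvSeqF, pvSeqV, hx, hb, if_true, if_false, Bool.false_eq_true]
    refine ih (pvFCV m ch r c pr pc v).2 ?_
    have : (pvFindCycleF m ch fuel r c pr pc v.1).2 = (pvFCV m ch r c pr pc v).2.1 := by
      rw [hx]
    rw [this] at hm
    exact lt_of_le_of_lt hm.2 hf

-- pvFCV on the four branch kinds
theorem pvFCV_quick1 (m : List (List String)) (ch : String) (r c pr pc : Int) (v : pvVS m)
    (h1 : r < 0 ∨ (m.length : Int) ≤ r) : pvFCV m ch r c pr pc v = (false, v) := by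
  refine Prod.ext ?_ (Subtype.ext ?_)
  · show (pvFindCycleF m ch (pvMu v.1 + 1) r c pr pc v.1).1 = false
    rw [pvF_succ_quick1 m ch (pvMu v.1) r c pr pc v.1 h1]
  · show (pvFindCycleF m ch (pvMu v.1 + 1) r c pr pc v.1).2 = v.1
    rw [pvF_succ_quick1 m ch (pvMu v.1) r c pr pc v.1 h1]

theorem pvFCV_quick2 (m : List (List String)) (ch : String) (r c pr pc : Int) (v : pvVS m)
    (h1 : ¬(r < 0 ∨ (m.length : Int) ≤ r))
    (h2 : c < 0 ∨ ((m.headD []).length : Int) ≤ c) : pvFCV m ch r c pr pc v = (false, v) := by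
  refine Prod.ext ?_ (Subtype.ext ?_)
  · show (pvFindCycleF m ch (pvMu v.1 + 1) r c pr pc v.1).1 = false
    rw [pvF_succ_quick2 m ch (pvMu v.1) r c pr pc v.1 h1 h2]
  · show (pvFindCycleF m ch (pvMu v.1 + 1) r c pr pc v.1).2 = v.1
    rw [pvF_succ_quick2 m ch (pvMu v.1) r c pr pc v.1 h1 h2]

theorem pvFCV_quick3 (m : List (List String)) (ch : String) (r c pr pc : Int) (v : pvVS m)
    (h1 : ¬(r < 0 ∨ (m.length : Int) ≤ r))
    (h2 : ¬(c < 0 ∨ ((m.headD []).length : Int) ≤ c))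
    (h3 : ¬((m.getD r.toNat []).getD c.toNat "" = ch)) :
    pvFCV m ch r c pr pc v = (false, v) := by
  refine Prod.ext ?_ (Subtype.ext ?_)
  · show (pvFindCycleF m ch (pvMu v.1 + 1) r c pr pc v.1).1 = false
    rw [pvF_succ_quick3 m ch (pvMu v.1) r c pr pc v.1 h1 h2 h3]
  · show (pvFindCycleF m ch (pvMu v.1 + 1) r c pr pc v.1).2 = v.1
    rw [pvF_succ_quick3 m ch (pvMu v.1) r c pr pc v.1 h1 h2 h3]

theorem pvFCV_hit (m : List (List String)) (ch : String) (r c pr pc : Int) (v : pvVS m)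
    (h1 : ¬(r < 0 ∨ (m.length : Int) ≤ r))
    (h2 : ¬(c < 0 ∨ ((m.headD []).length : Int) ≤ c))
    (h3 : (m.getD r.toNat []).getD c.toNat "" = ch)
    (h4 : pvLook v.1 r c = true) : pvFCV m ch r c pr pc v = (true, v) := by
  refine Prod.ext ?_ (Subtype.ext ?_)
  · show (pvFindCycleF m ch (pvMu v.1 + 1) r c pr pc v.1).1 = true
    rw [pvF_succ_hit m ch (pvMu v.1) r c pr pc v.1 h1 h2 h3 h4]
  · show (pvFindCycleF m ch (pvMu v.1 + 1) r c pr pc v.1).2 = v.1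
    rw [pvF_succ_hit m ch (pvMu v.1) r c pr pc v.1 h1 h2 h3 h4]

theorem pvFCV_prod (m : List (List String)) (ch : String) (r c pr pc : Int) (v : pvVS m)
    (h1 : ¬(r < 0 ∨ (m.length : Int) ≤ r))
    (h2 : ¬(c < 0 ∨ ((m.headD []).length : Int) ≤ c))
    (h3 : (m.getD r.toNat []).getD c.toNat "" = ch)
    (h4 : ¬(pvLook v.1 r c = true)) :
    pvFCV m ch r c pr pc v =
      pvSeqV m ch ⟨pvMark v.1 r c,
        pvShaped_mark _ _ v.1 v.2 r c (pv_hi _ _ v.1 v.2 r h1)⟩ (pvNbrs r c pr pc) := by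
  have hi := pv_hi _ _ v.1 v.2 r h1
  have hj := pv_hj _ _ v.1 v.2 r c h2 hi
  have hmark := pvMu_mark_lt v.1 r c hi hj (by simpa using h4)
  have hb := pvSeqF_bridge m ch (pvMu v.1) (pvNbrs r c pr pc)
    ⟨pvMark v.1 r c, pvShaped_mark _ _ v.1 v.2 r c hi⟩ hmark
  refine Prod.ext ?_ (Subtype.ext ?_)
  · show (pvFindCycleF m ch (pvMu v.1 + 1) r c pr pc v.1).1 = _
    rw [pvF_succ_prod m ch (pvMu v.1) r c pr pc v.1 h1 h2 h3 h4, hb]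
  · show (pvFindCycleF m ch (pvMu v.1 + 1) r c pr pc v.1).2 = _
    rw [pvF_succ_prod m ch (pvMu v.1) r c pr pc v.1 h1 h2 h3 h4, hb]

-- the machine equals subtype-level sequential execution of its stack
theorem pvRun_eq (m : List (List String)) (ch : String) (v : pvVS m)
    (stack : List (List (Int × Int × Int × Int))) :
    pvRun m ch v stack = pvSeqStackV m ch v stack := by
  fun_induction pvRun m ch v stack with
  | case1 v => simp [pvSeqStackV]
  | case2 v fs ih => simp only [pvSeqStackV, pvSeqV, if_false, Bool.false_eq_true]; exact ih
  | case3 v r c pr pc rest fs h1 ih =>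
    rw [ih]
    have hfc := pvFCV_quick1 m ch r c pr pc v h1
    simp only [pvSeqStackV, pvSeqV, hfc, if_false, Bool.false_eq_true]
  | case4 v r c pr pc rest fs h1 h2 ih =>
    rw [ih]
    have hfc := pvFCV_quick2 m ch r c pr pc v h1 h2
    simp only [pvSeqStackV, pvSeqV, hfc, if_false, Bool.false_eq_true]
  | case5 v r c pr pc rest fs h1 h2 h3 ih =>
    rw [ih]
    have hfc := pvFCV_quick3 m ch r c pr pc v h1 h2 h3
    simp only [pvSeqStackV, pvSeqV, hfc, if_false, Bool.false_eq_true]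
  | case6 v r c pr pc rest fs h1 h2 h3 h4 =>
    have hfc := pvFCV_hit m ch r c pr pc v h1 h2 (not_not.mp h3) h4
    simp only [pvSeqStackV, pvSeqV, hfc, if_true]
  | case7 v r c pr pc rest fs h1 h2 h3 h4 hi hj hlt v1 ih =>
    have hfc := pvFCV_prod m ch r c pr pc v h1 h2 (not_not.mp h3) h4
    have hstep : pvSeqStackV m ch ⟨pvMark v.1 r c,
        pvShaped_mark _ _ v.1 v.2 r c (pv_hi _ _ v.1 v.2 r h1)⟩
        (pvNbrs r c pr pc :: rest :: fs) = pvSeqStackV m ch v (((r, c, pr, pc) :: rest) :: fs) := by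
      cases hu : (pvSeqV m ch ⟨pvMark v.1 r c,
          pvShaped_mark _ _ v.1 v.2 r c (pv_hi _ _ v.1 v.2 r h1)⟩ (pvNbrs r c pr pc)).1 with
      | true =>
        conv_rhs => rw [pvSeqStackV]
        rw [show pvSeqV m ch v ((r, c, pr, pc) :: rest) =
              pvSeqV m ch ⟨pvMark v.1 r c,
                pvShaped_mark _ _ v.1 v.2 r c (pv_hi _ _ v.1 v.2 r h1)⟩ (pvNbrs r c pr pc) from ?_]
        · rw [pvSeqStackV, hu]; simp
        · rw [pvSeqV, hfc, hu]; simp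
      | false =>
        conv_rhs => rw [pvSeqStackV]
        rw [show pvSeqV m ch v ((r, c, pr, pc) :: rest) =
              pvSeqV m ch ((pvSeqV m ch ⟨pvMark v.1 r c,
                pvShaped_mark _ _ v.1 v.2 r c (pv_hi _ _ v.1 v.2 r h1)⟩ (pvNbrs r c pr pc)).2) rest from ?_]
        · rw [pvSeqStackV, hu]
          simp only [Bool.false_eq_true, if_false]
          cases hw : (pvSeqV m ch ((pvSeqV m ch ⟨pvMark v.1 r c,
              pvShaped_mark _ _ v.1 v.2 r c (pv_hi _ _ v.1 v.2 r h1)⟩ (pvNbrs r c pr pc)).2) rest).1 <;>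
            rw [pvSeqStackV] <;> simp [hw]
        · rw [pvSeqV, hfc, hu]; simp
    exact Eq.trans ih hstep

theorem pvRun_single (m : List (List String)) (ch : String) (v : pvVS m) (r c : Int) :
    pvRun m ch v [[(r, c, -1, -1)]] = pvFCV m ch r c (-1) (-1) v := by
  rw [pvRun_eq]
  cases hs : (pvFCV m ch r c (-1) (-1) v).1 <;>
    simp only [pvSeqStackV, pvSeqV_one, hs, if_true, if_false, Bool.false_eq_true]
  exact (Prod.ext hs.symm rfl)

theorem pvMu_le (v : List (List Bool)) (h w : Nat) (hs : pvShaped h w v) :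
    pvMu v ≤ h * w := by
  obtain ⟨hlen, hrows⟩ := hs
  subst hlen
  induction v with
  | nil => simp [pvMu]
  | cons a as ih =>
    have ha : a.count false ≤ w := by
      have := hrows a (by simp)
      simpa [← this] using List.count_le_length (l := a) (a := false)
    have := ih (fun row hr => hrows row (by simp [hr]))
    simp only [pvMu, List.map_cons, List.sum_cons, List.length_cons] at this ⊢
    have hw : (as.length + 1) * w = as.length * w + w := by ring
    omega

theorem pvOuter_eq (m : List (List String)) (cells : List (Int × Int)) :
    ∀ (v : pvVS m), pvOuterA m cells v.1 = pvOuterB m cells v := by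
  induction cells with
  | nil => intro v; rfl
  | cons x rest ih =>
    intro v
    obtain ⟨r, c⟩ := x
    by_cases hl : pvLook v.1 r c = true
    · simp only [pvOuterA, pvOuterB, hl, if_true]
      exact ih v
    · have hf : pvMu v.1 < m.length * (m.headD []).length + 1 := by
        have := pvMu_le v.1 m.length (m.headD []).length v.2
        omega
      have hx := pvF_at m ((m.getD r.toNat []).getD c.toNat "")
        (m.length * (m.headD []).length + 1) r c (-1) (-1) v hf
      simp only [pvOuterA, pvOuterB, hl, if_false, Bool.false_eq_true, hx,
        pvRun_single m ((m.getD r.toNat []).getD c.toNat "") v r c]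
      cases hb : (pvFCV m ((m.getD r.toNat []).getD c.toNat "") r c (-1) (-1) v).1 <;>
        simp only [hb, if_true, if_false, Bool.false_eq_true]
      exact ih (pvFCV m ((m.getD r.toNat []).getD c.toNat "") r c (-1) (-1) v).2

-- ===== VERDICT (by name: the statement is the Claim_ definition above) =====
theorem matrix_cycle_spec : Claim_equal_matrix_cycle := by
  intro matrix _ _
  unfold Spec_matrix_cycle matrix_cycle matrix_cycle_alt
  exact pvOuter_eq matrix (pvCells matrix.length (matrix.headD []).length)
    ⟨pvInitV matrix.length (matrix.headD []).length,
      pvShaped_init matrix.length (matrix.headD []).length⟩
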